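-- pv_equiv track=rewrite | github.com/amanmukati09/chip_design_deeprl | optimizer/mutations.py | _eval_gate
-- ===== SOURCE A (Python) =====
-- from typing import Tuple, Dict, List, Optional
--
-- def _eval_gate(gate_type: str, input_vals: List[int]) -> int:
--     """Evaluates one gate given integer input values (0 or 1)."""
--     if gate_type in ('BUFF', 'INPUT'):
--         return input_vals[0]
--     elif gate_type == 'NOT':
--         return 1 - input_vals[0]
--     elif gate_type == 'AND':
--         result = 1
--         for v in input_vals:
--             result &= v
--         return result
--     elif gate_type == 'NAND':
--         result = 1
--         for v in input_vals:
--             result &= v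
--         return 1 - result
--     elif gate_type == 'OR':
--         result = 0
--         for v in input_vals:
--             result |= v
--         return result
--     elif gate_type == 'NOR':
--         result = 0
--         for v in input_vals:
--             result |= v
--         return 1 - result
--     elif gate_type == 'XOR':
--         result = 0
--         for v in input_vals:
--             result ^= v
--         return result
--     elif gate_type == 'XNOR':
--         result = 0
--         for v in input_vals:
--             result ^= v
--         return 1 - result
--     elif gate_type == 'DFF':
--         # DFF is sequential — cannot truth-table it statically.
--         # Return input as-is (transparent latch approximation).
--         return input_vals[0]
--     else:
--         return 0
-- ===== SOURCE B (Python) =====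
-- # Recursive decomposition: inverting gates (NOT/NAND/NOR/XNOR) delegate to their
-- # positive counterpart, and the reductions recurse on the list (head op rest)
-- # instead of iterating with an accumulator.
-- def _eval_gate(gate_type, input_vals):
--     """Evaluates one gate given integer input values (0 or 1)."""
--     if gate_type == 'NOT':
--         return 1 - _eval_gate('BUFF', input_vals)
--     if gate_type == 'NAND':
--         return 1 - _eval_gate('AND', input_vals)
--     if gate_type == 'NOR':
--         return 1 - _eval_gate('OR', input_vals)
--     if gate_type == 'XNOR':
--         return 1 - _eval_gate('XOR', input_vals)
--     if gate_type in ('BUFF', 'INPUT', 'DFF'):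
--         return input_vals[0]
--     if gate_type == 'AND':
--         return input_vals[0] & _eval_gate('AND', input_vals[1:]) if input_vals else 1
--     if gate_type == 'OR':
--         return input_vals[0] | _eval_gate('OR', input_vals[1:]) if input_vals else 0
--     if gate_type == 'XOR':
--         return input_vals[0] ^ _eval_gate('XOR', input_vals[1:]) if input_vals else 0
--     return 0
-- ===== Notes on version B (the rewrite author's own statement) =====
-- stated objective: alternative
-- what changed: Replaces A's eight-branch chain of accumulator loops by a recursive decomposition: each inverting gate (NOT/NAND/NOR/XNOR) is 1 minus its positive counterpart, and AND/OR/XOR reduce the list by structural recursion (head op recurse-on-tail, i.e. a right fold) instead of a left-to-right accumulator loop; equal because Python's bitwise &,|,^ are associative and commutative.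
import Mathlib
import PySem

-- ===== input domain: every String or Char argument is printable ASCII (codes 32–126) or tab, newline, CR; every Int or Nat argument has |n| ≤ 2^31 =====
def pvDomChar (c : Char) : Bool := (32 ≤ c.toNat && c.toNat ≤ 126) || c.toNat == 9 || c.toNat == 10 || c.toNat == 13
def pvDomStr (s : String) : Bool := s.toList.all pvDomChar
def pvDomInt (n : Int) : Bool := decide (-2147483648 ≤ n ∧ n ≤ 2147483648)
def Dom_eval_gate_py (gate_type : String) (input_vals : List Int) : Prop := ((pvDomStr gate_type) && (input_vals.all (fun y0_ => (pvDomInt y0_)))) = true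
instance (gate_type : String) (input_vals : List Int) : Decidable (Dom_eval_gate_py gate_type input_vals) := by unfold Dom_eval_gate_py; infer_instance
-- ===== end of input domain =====

-- B replaces A's eight accumulator loops with a recursive decomposition (inverting
-- gates delegate to their positive counterpart; AND/OR/XOR recurse on the list,
-- a right fold); objective: alternative, same cost.

-- ===== PORT A =====
def eval_gate_py (gate_type : String) (input_vals : List Int) : Int :=
  if gate_type = "BUFF" ∨ gate_type = "INPUT" then (PySem.List.pyGet? input_vals 0).getD 0
  else if gate_type = "NOT" then 1 - (PySem.List.pyGet? input_vals 0).getD 0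
  else if gate_type = "AND" then input_vals.foldl (fun result v => PySem.Int.band result v) 1
  else if gate_type = "NAND" then 1 - input_vals.foldl (fun result v => PySem.Int.band result v) 1
  else if gate_type = "OR" then input_vals.foldl (fun result v => PySem.Int.bor result v) 0
  else if gate_type = "NOR" then 1 - input_vals.foldl (fun result v => PySem.Int.bor result v) 0
  else if gate_type = "XOR" then input_vals.foldl (fun result v => PySem.Int.bxor result v) 0
  else if gate_type = "XNOR" then 1 - input_vals.foldl (fun result v => PySem.Int.bxor result v) 0
  else if gate_type = "DFF" then (PySem.List.pyGet? input_vals 0).getD 0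
  else 0

-- ===== PORT B =====
def eval_gate_py_alt (gate_type : String) (input_vals : List Int) : Int :=
  if gate_type = "NOT" then 1 - eval_gate_py_alt "BUFF" input_vals
  else if gate_type = "NAND" then 1 - eval_gate_py_alt "AND" input_vals
  else if gate_type = "NOR" then 1 - eval_gate_py_alt "OR" input_vals
  else if gate_type = "XNOR" then 1 - eval_gate_py_alt "XOR" input_vals
  else if gate_type = "BUFF" ∨ gate_type = "INPUT" ∨ gate_type = "DFF" then
    (PySem.List.pyGet? input_vals 0).getD 0
  else if gate_type = "AND" then
    match input_vals with
    | [] => 1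
    | v :: rest => PySem.Int.band v (eval_gate_py_alt "AND" rest)
  else if gate_type = "OR" then
    match input_vals with
    | [] => 0
    | v :: rest => PySem.Int.bor v (eval_gate_py_alt "OR" rest)
  else if gate_type = "XOR" then
    match input_vals with
    | [] => 0
    | v :: rest => PySem.Int.bxor v (eval_gate_py_alt "XOR" rest)
  else 0
termination_by ((if gate_type = "NOT" ∨ gate_type = "NAND" ∨ gate_type = "NOR" ∨ gate_type = "XNOR" then 1 else 0 : Nat), input_vals.length)
decreasing_by all_goals simp_all <;> omega

-- ===== PRECONDITION & SPEC =====
-- Pre_ excludes exactly the inputs on which the Python A raises IndexError: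
-- the passthrough/unary gates applied to an empty input list.
def Pre_eval_gate_py (gate_type : String) (input_vals : List Int) : Prop :=
  (gate_type = "BUFF" ∨ gate_type = "INPUT" ∨ gate_type = "NOT" ∨ gate_type = "DFF") →
    input_vals ≠ []
instance (gate_type : String) (input_vals : List Int) : Decidable (Pre_eval_gate_py gate_type input_vals) := by unfold Pre_eval_gate_py; infer_instance
def pvWitness_eval_gate_py : String × List Int := ("NAND", [1, 0, 1])

def Spec_eval_gate_py (gate_type : String) (input_vals : List Int) (out : Int) : Prop := out = eval_gate_py_alt gate_type input_vals
instance (gate_type : String) (input_vals : List Int) (out : Int) : Decidable (Spec_eval_gate_py gate_type input_vals out) := by unfold Spec_eval_gate_py; infer_instance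

-- ===== CLAIM =====
def Claim_equal_eval_gate_py : Prop := ∀ (gate_type : String) (input_vals : List Int), Dom_eval_gate_py gate_type input_vals → Pre_eval_gate_py gate_type input_vals → Spec_eval_gate_py gate_type input_vals (eval_gate_py gate_type input_vals)

-- ===== LEMMAS AND PROOFS =====

-- Nat: subtracting the common bits is bitwise set difference.
theorem pv_sub_and (m n : Nat) : m - (m &&& n) = m.ldiff n := by
  induction m using Nat.binaryRec generalizing n with
  | zero =>
    have h : Nat.ldiff 0 n = 0 := by
      apply Nat.eq_of_testBit_eq; intro k; simp [Nat.testBit_ldiff]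
    simp [h]
  | bit b m ih =>
    induction n using Nat.binaryRec with
    | zero =>
      have h : Nat.ldiff (Nat.bit b m) 0 = Nat.bit b m := by
        apply Nat.eq_of_testBit_eq; intro k; simp [Nat.testBit_ldiff]
      simp [h]
    | bit c n _ =>
      rw [Nat.land_bit, Nat.ldiff_bit]
      have h1 : m &&& n ≤ m := Nat.and_le_left
      have h2 := ih n
      cases b <;> cases c <;> simp [Nat.bit_val] at * <;> omega

-- representation lemmas: the PySem ops on ofNat/negSucc arguments
theorem pv_band_pp (u v : Nat) : PySem.Int.band (Int.ofNat u) (Int.ofNat v) = Int.ofNat (u &&& v) := by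
  simp [PySem.Int.band]
theorem pv_band_pn (u v : Nat) : PySem.Int.band (Int.ofNat u) (Int.negSucc v) = Int.ofNat (u.ldiff v) := by
  have hv : ¬ ((v:Int) ≤ -1) := by omega
  simp [PySem.Int.band, Int.negSucc_eq, pv_sub_and, hv]
theorem pv_band_np (u v : Nat) : PySem.Int.band (Int.negSucc u) (Int.ofNat v) = Int.ofNat (v.ldiff u) := by
  rw [PySem.Int.band_comm, pv_band_pn]
theorem pv_band_nn (u v : Nat) : PySem.Int.band (Int.negSucc u) (Int.negSucc v) = Int.negSucc (u ||| v) := by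
  have hu : ¬ ((u:Int) ≤ -1) := by omega
  have hv : ¬ ((v:Int) ≤ -1) := by omega
  simp [PySem.Int.band, Int.negSucc_eq, hu, hv]
  omega

theorem pv_bor_pp (u v : Nat) : PySem.Int.bor (Int.ofNat u) (Int.ofNat v) = Int.ofNat (u ||| v) := by
  simp [PySem.Int.bor]
theorem pv_bor_pn (u v : Nat) : PySem.Int.bor (Int.ofNat u) (Int.negSucc v) = Int.negSucc (v.ldiff u) := by
  have hv : ¬ ((v:Int) ≤ -1) := by omega
  simp [PySem.Int.bor, Int.negSucc_eq, pv_sub_and, hv]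
  omega
theorem pv_bor_np (u v : Nat) : PySem.Int.bor (Int.negSucc u) (Int.ofNat v) = Int.negSucc (u.ldiff v) := by
  rw [PySem.Int.bor_comm, pv_bor_pn]
theorem pv_bor_nn (u v : Nat) : PySem.Int.bor (Int.negSucc u) (Int.negSucc v) = Int.negSucc (u &&& v) := by
  have hu : ¬ ((u:Int) ≤ -1) := by omega
  have hv : ¬ ((v:Int) ≤ -1) := by omega
  simp [PySem.Int.bor, Int.negSucc_eq, hu, hv]
  omega

theorem pv_bxor_pp (u v : Nat) : PySem.Int.bxor (Int.ofNat u) (Int.ofNat v) = Int.ofNat (u ^^^ v) := by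
  simp [PySem.Int.bxor]
theorem pv_bxor_pn (u v : Nat) : PySem.Int.bxor (Int.ofNat u) (Int.negSucc v) = Int.negSucc (u ^^^ v) := by
  have hv : ¬ ((v:Int) ≤ -1) := by omega
  simp [PySem.Int.bxor, Int.negSucc_eq, hv]
  omega
theorem pv_bxor_np (u v : Nat) : PySem.Int.bxor (Int.negSucc u) (Int.ofNat v) = Int.negSucc (u ^^^ v) := by
  rw [PySem.Int.bxor_comm, pv_bxor_pn, Nat.xor_comm]
theorem pv_bxor_nn (u v : Nat) : PySem.Int.bxor (Int.negSucc u) (Int.negSucc v) = Int.ofNat (u ^^^ v) := by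
  have hu : ¬ ((u:Int) ≤ -1) := by omega
  have hv : ¬ ((v:Int) ≤ -1) := by omega
  simp [PySem.Int.bxor, Int.negSucc_eq, hu, hv]

-- associativity of the three Python bitwise ops, via bitwise extensionality on Nat
theorem pv_band_assoc (a b c : Int) :
    PySem.Int.band (PySem.Int.band a b) c = PySem.Int.band a (PySem.Int.band b c) := by
  cases a <;> cases b <;> cases c <;>
    simp only [pv_band_pp, pv_band_pn, pv_band_np, pv_band_nn] <;>
    congr 1 <;>
    apply Nat.eq_of_testBit_eq <;> intro k <;>
    simp only [Nat.testBit_and, Nat.testBit_or, Nat.testBit_ldiff] <;>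
    cases h1 : Nat.testBit _ k <;> cases h2 : Nat.testBit _ k <;> cases h3 : Nat.testBit _ k <;>
    simp_all

theorem pv_bor_assoc (a b c : Int) :
    PySem.Int.bor (PySem.Int.bor a b) c = PySem.Int.bor a (PySem.Int.bor b c) := by
  cases a <;> cases b <;> cases c <;>
    simp only [pv_bor_pp, pv_bor_pn, pv_bor_np, pv_bor_nn] <;>
    congr 1 <;>
    apply Nat.eq_of_testBit_eq <;> intro k <;>
    simp only [Nat.testBit_and, Nat.testBit_or, Nat.testBit_ldiff] <;>
    cases h1 : Nat.testBit _ k <;> cases h2 : Nat.testBit _ k <;> cases h3 : Nat.testBit _ k <;>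
    simp_all

theorem pv_bxor_assoc (a b c : Int) :
    PySem.Int.bxor (PySem.Int.bxor a b) c = PySem.Int.bxor a (PySem.Int.bxor b c) := by
  cases a <;> cases b <;> cases c <;>
    simp only [pv_bxor_pp, pv_bxor_pn, pv_bxor_np, pv_bxor_nn] <;>
    congr 1 <;>
    apply Nat.eq_of_testBit_eq <;> intro k <;>
    simp only [Nat.testBit_xor] <;>
    cases h1 : Nat.testBit _ k <;> cases h2 : Nat.testBit _ k <;> cases h3 : Nat.testBit _ k <;>
    simp_all

-- a left fold of an associative, commutative operation equals the right fold
theorem pv_foldr_op_cons (op : Int → Int → Int)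
    (hc : ∀ a b, op a b = op b a) (ha : ∀ a b c, op (op a b) c = op a (op b c))
    (xs : List Int) (a x : Int) :
    xs.foldr op (op a x) = op x (xs.foldr op a) := by
  induction xs with
  | nil => exact hc a x
  | cons y ys ih =>
      simp only [List.foldr_cons, ih]
      rw [← ha, hc y x, ha]

theorem pv_foldl_eq_foldr (op : Int → Int → Int)
    (hc : ∀ a b, op a b = op b a) (ha : ∀ a b c, op (op a b) c = op a (op b c))
    (xs : List Int) (a : Int) :
    xs.foldl op a = xs.foldr op a := by
  induction xs generalizing a with
  | nil => rfl
  | cons x t ih =>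
      simp only [List.foldl_cons, List.foldr_cons, ih]
      exact pv_foldr_op_cons op hc ha t a x

-- B's recursive gates compute right folds
theorem pv_alt_and (xs : List Int) :
    eval_gate_py_alt "AND" xs = xs.foldr PySem.Int.band 1 := by
  induction xs with
  | nil => rw [eval_gate_py_alt.eq_def]; rfl
  | cons v rest ih => rw [eval_gate_py_alt.eq_def]; simp [ih]

theorem pv_alt_or (xs : List Int) :
    eval_gate_py_alt "OR" xs = xs.foldr PySem.Int.bor 0 := by
  induction xs with
  | nil => rw [eval_gate_py_alt.eq_def]; rfl
  | cons v rest ih => rw [eval_gate_py_alt.eq_def]; simp [ih]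

theorem pv_alt_xor (xs : List Int) :
    eval_gate_py_alt "XOR" xs = xs.foldr PySem.Int.bxor 0 := by
  induction xs with
  | nil => rw [eval_gate_py_alt.eq_def]; rfl
  | cons v rest ih => rw [eval_gate_py_alt.eq_def]; simp [ih]

-- ===== VERDICT =====
theorem eval_gate_py_spec : Claim_equal_eval_gate_py := by
  intro g xs _ _
  unfold Spec_eval_gate_py eval_gate_py
  by_cases h1 : g = "BUFF"
  · subst h1; rw [eval_gate_py_alt.eq_def]; simp
  by_cases h2 : g = "INPUT"
  · subst h2; rw [eval_gate_py_alt.eq_def]; simp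
  by_cases h3 : g = "NOT"
  · subst h3; rw [eval_gate_py_alt.eq_def]; simp; rw [eval_gate_py_alt.eq_def]; simp
  by_cases h4 : g = "AND"
  · subst h4; simp [pv_alt_and,
      pv_foldl_eq_foldr PySem.Int.band PySem.Int.band_comm pv_band_assoc]
  by_cases h5 : g = "NAND"
  · subst h5; rw [eval_gate_py_alt.eq_def]; simp [pv_alt_and,
      pv_foldl_eq_foldr PySem.Int.band PySem.Int.band_comm pv_band_assoc]
  by_cases h6 : g = "OR"
  · subst h6; simp [pv_alt_or,
      pv_foldl_eq_foldr PySem.Int.bor PySem.Int.bor_comm pv_bor_assoc]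
  by_cases h7 : g = "NOR"
  · subst h7; rw [eval_gate_py_alt.eq_def]; simp [pv_alt_or,
      pv_foldl_eq_foldr PySem.Int.bor PySem.Int.bor_comm pv_bor_assoc]
  by_cases h8 : g = "XOR"
  · subst h8; simp [pv_alt_xor,
      pv_foldl_eq_foldr PySem.Int.bxor PySem.Int.bxor_comm pv_bxor_assoc]
  by_cases h9 : g = "XNOR"
  · subst h9; rw [eval_gate_py_alt.eq_def]; simp [pv_alt_xor,
      pv_foldl_eq_foldr PySem.Int.bxor PySem.Int.bxor_comm pv_bxor_assoc]
  by_cases h10 : g = "DFF"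
  · subst h10; rw [eval_gate_py_alt.eq_def]; simp
  · rw [eval_gate_py_alt.eq_def]; simp [h1, h2, h3, h4, h5, h6, h7, h8, h9, h10]
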